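-- pv_equiv track=rewrite | github.com/ArpanGyawali/Stroke_hybrid_clinical_chatbot | src/tools/structured_query_tool.py | generate_clean_code
-- ===== SOURCE A (Python) =====
-- def generate_clean_code(generated_code: str) -> str:
--     """Clean and normalize indentation of generated code."""
--
--     # Remove markdown code fences and clean up
--     lines = generated_code.strip().split('\n')
--     clean_lines = []
--
--     for line in lines:
--         stripped = line.strip()
--
--         # Skip markdown code fences
--         if stripped.startswith("```"):
--             continue
--
--         # Skip empty lines and full-line comments
--         if not stripped or stripped.startswith("#"):
--             continue
--
--         clean_lines.append(stripped)
--
--     # Reconstruct with proper indentation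
--     if not clean_lines:
--         return ""
--
--     # Join lines and use textwrap.dedent to normalize
--     code = '\n'.join(clean_lines)
--
--     # Now rebuild with consistent 4-space indentation
--     final_lines = []
--     indent_level = 0
--
--     for line in code.split('\n'):
--         stripped = line.strip()
--         if not stripped:
--             continue
--
--         # Decrease indent for except, else, finally, and closing blocks
--         if any(stripped.startswith(keyword) for keyword in ['except', 'else', 'finally', 'elif']):
--             indent_level = max(0, indent_level - 1)
--
--         # Add line with proper indentation
--         final_lines.append('    ' * indent_level + stripped)
--
--         # Increase indent after colons (try, if, for, while, def, class, etc.)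
--         if stripped.endswith(':'):
--             indent_level += 1
--
--     return '\n'.join(final_lines)
-- ===== SOURCE B (Python) =====
-- def generate_clean_code(generated_code: str) -> str:
--     """Clean and normalize indentation of generated code (single pass)."""
--     out = []
--     indent_level = 0
--     for line in generated_code.strip().split('\n'):
--         stripped = line.strip()
--         if stripped.startswith("```") or not stripped or stripped.startswith("#"):
--             continue
--         if stripped.startswith(('except', 'else', 'finally', 'elif')):
--             indent_level = max(0, indent_level - 1)
--         out.append('    ' * indent_level + stripped)
--         if stripped.endswith(':'):
--             indent_level += 1
--     return '\n'.join(out)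
-- ===== Notes on version B (the rewrite author's own statement) =====
-- stated objective: simpler
-- what changed: Fused A's two passes (build clean_lines, join, re-split, re-indent) into one loop over the split input that filters and re-indents each line directly, removing the intermediate clean_lines/join/split and the early-return.
import Mathlib
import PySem

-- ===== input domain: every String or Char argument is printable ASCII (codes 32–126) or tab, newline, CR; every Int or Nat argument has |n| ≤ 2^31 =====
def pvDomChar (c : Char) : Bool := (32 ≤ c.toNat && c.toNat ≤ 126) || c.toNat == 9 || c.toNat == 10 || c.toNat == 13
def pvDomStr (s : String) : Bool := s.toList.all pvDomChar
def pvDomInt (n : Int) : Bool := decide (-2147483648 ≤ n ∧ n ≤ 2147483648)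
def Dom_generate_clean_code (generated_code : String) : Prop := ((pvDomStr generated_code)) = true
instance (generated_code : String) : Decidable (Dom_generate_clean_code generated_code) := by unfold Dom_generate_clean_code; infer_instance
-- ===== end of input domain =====

-- B fuses A's two passes (collect clean_lines, join, re-split, re-indent) into one loop; same return value, no speed claim.

-- shared helpers (both Pythons contain these expressions verbatim)
-- Python's '    ' * n  (empty for n ≤ 0)
def pvStrMul (s : List Char) (n : Int) : List Char := (List.replicate n.toNat s).flatten

-- the emit step both loops share: dedent before except/else/finally/elif, emit, indent after ':'
def pvEmit (st : List (List Char) × Int) (stripped : List Char) : List (List Char) × Int :=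
  let lvl := if (["except", "else", "finally", "elif"] : List String).any
                (fun k => PySem.Chars.startswith stripped k.toList)
             then max 0 (st.2 - 1) else st.2
  (st.1 ++ [pvStrMul "    ".toList lvl ++ stripped],
   if PySem.Chars.endswith stripped [':'] then lvl + 1 else lvl)

-- ===== PORT A =====
-- body of A's first loop (filter out fences, blanks, comments; collect stripped lines)
def pvCleanStep (acc : List (List Char)) (line : List Char) : List (List Char) :=
  let stripped := PySem.Chars.strip line
  if PySem.Chars.startswith stripped "```".toList then acc
  else if stripped.isEmpty || PySem.Chars.startswith stripped "#".toList then acc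
  else acc ++ [stripped]

-- body of A's second loop (skip blanks, re-indent)
def pvStep2 (st : List (List Char) × Int) (line : List Char) : List (List Char) × Int :=
  let stripped := PySem.Chars.strip line
  if stripped.isEmpty then st
  else pvEmit st stripped

def generate_clean_code_core (gc : List Char) : List Char :=
  let lines := PySem.Chars.splitOn (PySem.Chars.strip gc) ['\n']
  let clean := lines.foldl pvCleanStep []
  if clean.isEmpty then []
  else
    let code := PySem.Chars.join ['\n'] clean
    let st := (PySem.Chars.splitOn code ['\n']).foldl pvStep2 ([], 0)
    PySem.Chars.join ['\n'] st.1

def generate_clean_code (generated_code : String) : String :=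
  String.ofList (generate_clean_code_core generated_code.toList)

-- ===== PORT B =====
-- body of B's single loop: filter and re-indent in one step
def pvFusedStep (st : List (List Char) × Int) (line : List Char) : List (List Char) × Int :=
  let stripped := PySem.Chars.strip line
  if PySem.Chars.startswith stripped "```".toList || stripped.isEmpty
       || PySem.Chars.startswith stripped "#".toList then st
  else pvEmit st stripped

def generate_clean_code_alt_core (gc : List Char) : List Char :=
  let st := (PySem.Chars.splitOn (PySem.Chars.strip gc) ['\n']).foldl pvFusedStep ([], 0)
  PySem.Chars.join ['\n'] st.1

def generate_clean_code_alt (generated_code : String) : String :=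
  String.ofList (generate_clean_code_alt_core generated_code.toList)

-- ===== PRECONDITION & SPEC =====
def Spec_generate_clean_code (generated_code : String) (out : String) : Prop := out = generate_clean_code_alt generated_code
instance (generated_code : String) (out : String) : Decidable (Spec_generate_clean_code generated_code out) := by unfold Spec_generate_clean_code; infer_instance

-- ===== CLAIM (what is proved, stated in full; the proofs are below) =====
def Claim_equal_generate_clean_code : Prop := ∀ (generated_code : String), Dom_generate_clean_code generated_code → Spec_generate_clean_code generated_code (generate_clean_code generated_code)

-- ===== LEMMAS AND PROOFS =====

-- reference single-char splitter: pvSplit c pref l splits l at c, pref = chars of the current piece so far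
def pvSplit (c : Char) : List Char → List Char → List (List Char)
  | pref, [] => [pref]
  | pref, x :: rest => if x = c then pref :: pvSplit c [] rest else pvSplit c (pref ++ [x]) rest

theorem pvSplitOn_go_eq (c : Char) (l : List Char) : ∀ (fuel : Nat) (cur : List Char)
    (acc : List (List Char)), l.length < fuel →
    PySem.Chars.splitOn.go [c] fuel l cur acc = acc.reverse ++ pvSplit c cur.reverse l := by
  induction l with
  | nil =>
    intro fuel cur acc h
    match fuel with
    | fuel + 1 => simp [PySem.Chars.splitOn.go, pvSplit]
  | cons x rest ih =>
    intro fuel cur acc h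
    match fuel with
    | fuel + 1 =>
      simp only [PySem.Chars.splitOn.go, List.isPrefixOf, Bool.and_true]
      by_cases hx : c = x
      · subst hx
        simp only [beq_self_eq_true, if_pos, List.length_cons, List.length_nil,
          List.drop_succ_cons, List.drop_zero]
        rw [ih fuel [] (cur.reverse :: acc) (by simpa using h)]
        simp [pvSplit]
      · have hx' : ¬ x = c := fun he => hx he.symm
        rw [if_neg (by simpa using hx)]
        rw [ih fuel (x :: cur) acc (by simpa using Nat.lt_of_succ_lt_succ h)]
        simp [pvSplit, hx']

theorem pvSplitOn_eq (c : Char) (s : List Char) :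
    PySem.Chars.splitOn s [c] = pvSplit c [] s := by
  have := pvSplitOn_go_eq c s (s.length + 1) [] [] (Nat.lt_succ_self _)
  simpa [PySem.Chars.splitOn] using this

theorem pvSplit_not_mem (c : Char) (l : List Char) : ∀ (pref p : List Char), c ∉ pref →
    p ∈ pvSplit c pref l → c ∉ p := by
  induction l with
  | nil => intro pref p hpref hp; simp [pvSplit] at hp; subst hp; exact hpref
  | cons x rest ih =>
    intro pref p hpref hp
    by_cases hx : x = c
    · subst hx
      simp [pvSplit] at hp
      rcases hp with rfl | hp
      · exact hpref
      · exact ih [] p (by simp) hp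
    · simp only [pvSplit, if_neg hx] at hp
      exact ih (pref ++ [x]) p (by simp [hpref, Ne.symm hx]) hp

theorem pvSplit_no_sep (c : Char) (p : List Char) : ∀ (pref : List Char), c ∉ p →
    pvSplit c pref p = [pref ++ p] := by
  induction p with
  | nil => intro pref _; simp [pvSplit]
  | cons x rest ih =>
    intro pref h
    have hx : x ≠ c := fun he => h (by simp [he])
    simp only [pvSplit, if_neg hx]
    rw [ih (pref ++ [x]) (fun hm => h (List.mem_cons_of_mem _ hm))]
    simp

theorem pvSplit_piece (c : Char) (p : List Char) : ∀ (pref t : List Char), c ∉ p →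
    pvSplit c pref (p ++ c :: t) = (pref ++ p) :: pvSplit c [] t := by
  induction p with
  | nil => intro pref t _; simp [pvSplit]
  | cons x rest ih =>
    intro pref t h
    have hx : x ≠ c := fun he => h (by simp [he])
    simp only [List.cons_append, pvSplit, if_neg hx]
    rw [ih (pref ++ [x]) t (fun hm => h (List.mem_cons_of_mem _ hm))]
    simp

theorem pvSplit_join (c : Char) (ps : List (List Char)) : ∀ (p pref : List Char),
    (∀ q ∈ p :: ps, c ∉ q) →
    pvSplit c pref (PySem.Chars.join [c] (p :: ps)) = (pref ++ p) :: ps := by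
  induction ps with
  | nil =>
    intro p pref h
    rw [PySem.Chars.join_singleton]
    exact pvSplit_no_sep c p pref (h p (by simp))
  | cons q qs ih =>
    intro p pref h
    rw [PySem.Chars.join_cons_cons]
    have : p ++ [c] ++ PySem.Chars.join [c] (q :: qs)
        = p ++ c :: PySem.Chars.join [c] (q :: qs) := by simp
    rw [this, pvSplit_piece c p pref _ (h p (by simp))]
    rw [ih q [] (fun r hr => h r (by simp at hr ⊢; tauto))]
    simp

-- dropWhile facts
theorem pvDropWhile_idem {α : Type} (p : α → Bool) (l : List α) :
    List.dropWhile p (List.dropWhile p l) = List.dropWhile p l := by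
  induction l with
  | nil => simp
  | cons x xs ih =>
    by_cases hx : p x
    · simp [hx, ih]
    · simp [hx]

theorem pvDropWhile_head_false {α : Type} (p : α → Bool) (a : α) (l : List α)
    (h : List.dropWhile p (a :: l) = a :: l) : p a = false := by
  by_contra hpa
  have hpa' : p a = true := by simpa using hpa
  have h' : List.dropWhile p l = a :: l := by simpa [hpa'] using h
  have hlen : (List.dropWhile p l).length ≤ l.length := (List.dropWhile_sublist _).length_le
  have := congrArg List.length h'
  simp at this
  omega

theorem pvDropWhile_eq_self_of_prefix {α : Type} (p : α → Bool) {u t : List α}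
    (ht : List.dropWhile p t = t) (hu : u <+: t) : List.dropWhile p u = u := by
  cases u with
  | nil => simp
  | cons x xs =>
    obtain ⟨r, hr⟩ := hu
    subst hr
    rw [List.cons_append] at ht
    have hx := pvDropWhile_head_false p x (xs ++ r) ht
    simp [hx]

theorem pvRstrip_prefix (t : List Char) : PySem.Chars.rstrip t <+: t := by
  unfold PySem.Chars.rstrip
  have h : List.dropWhile PySem.Chars.isspace t.reverse <:+ t.reverse := List.dropWhile_suffix _
  have h2 := List.reverse_prefix.mpr h
  simpa using h2

theorem pvStrip_idem (s : List Char) :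
    PySem.Chars.strip (PySem.Chars.strip s) = PySem.Chars.strip s := by
  unfold PySem.Chars.strip
  have hl : PySem.Chars.lstrip (PySem.Chars.lstrip s) = PySem.Chars.lstrip s :=
    pvDropWhile_idem _ _
  have hlr : PySem.Chars.lstrip (PySem.Chars.rstrip (PySem.Chars.lstrip s))
      = PySem.Chars.rstrip (PySem.Chars.lstrip s) := by
    unfold PySem.Chars.lstrip at hl ⊢
    exact pvDropWhile_eq_self_of_prefix _ hl (pvRstrip_prefix _)
  rw [hlr]
  unfold PySem.Chars.rstrip
  rw [List.reverse_reverse, pvDropWhile_idem]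

theorem pvMem_strip {x : Char} {s : List Char} (h : x ∈ PySem.Chars.strip s) : x ∈ s := by
  unfold PySem.Chars.strip PySem.Chars.rstrip PySem.Chars.lstrip at h
  rw [List.mem_reverse] at h
  have h1 := (List.dropWhile_sublist (l := (List.dropWhile PySem.Chars.isspace s).reverse)
    (p := PySem.Chars.isspace)).mem h
  rw [List.mem_reverse] at h1
  exact (List.dropWhile_sublist _).mem h1

-- A's first loop as a filterMap
def pvPick (line : List Char) : Option (List Char) :=
  let stripped := PySem.Chars.strip line
  if PySem.Chars.startswith stripped "```".toList then none
  else if stripped.isEmpty || PySem.Chars.startswith stripped "#".toList then none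
  else some stripped

theorem pvClean_eq_filterMap (lines : List (List Char)) : ∀ (acc : List (List Char)),
    lines.foldl pvCleanStep acc = acc ++ lines.filterMap pvPick := by
  induction lines with
  | nil => intro acc; simp
  | cons l ls ih =>
    intro acc
    simp only [List.foldl_cons, List.filterMap_cons]
    rw [ih]
    simp only [pvCleanStep, pvPick]
    split_ifs with h1 h2 <;> simp

theorem pvFused_eq_step2 (lines : List (List Char)) : ∀ (st : List (List Char) × Int),
    lines.foldl pvFusedStep st = (lines.filterMap pvPick).foldl pvStep2 st := by
  induction lines with
  | nil => intro st; simp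
  | cons l ls ih =>
    intro st
    by_cases h1 : PySem.Chars.startswith (PySem.Chars.strip l) ['`', '`', '`'] = true
    · have hp : pvPick l = none := by simp [pvPick, h1]
      have hf : pvFusedStep st l = st := by simp [pvFusedStep, h1]
      simp only [List.foldl_cons, List.filterMap_cons, hp, hf, ih]
    · by_cases hE : PySem.Chars.strip l = []
      · have hp : pvPick l = none := by simp [pvPick, hE]
        have hf : pvFusedStep st l = st := by simp [pvFusedStep, hE]
        simp only [List.foldl_cons, List.filterMap_cons, hp, hf, ih]
      · by_cases h3 : PySem.Chars.startswith (PySem.Chars.strip l) ['#'] = true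
        · have hp : pvPick l = none := by simp [pvPick, h1, h3]
          have hf : pvFusedStep st l = st := by simp [pvFusedStep, h3]
          simp only [List.foldl_cons, List.filterMap_cons, hp, hf, ih]
        · have hp : pvPick l = some (PySem.Chars.strip l) := by
            simp [pvPick, h1, hE, h3]
          have hf : pvFusedStep st l = pvEmit st (PySem.Chars.strip l) := by
            simp [pvFusedStep, h1, hE, h3]
          have hs : pvStep2 st (PySem.Chars.strip l) = pvEmit st (PySem.Chars.strip l) := by
            simp [pvStep2, pvStrip_idem, hE]
          simp only [List.foldl_cons, List.filterMap_cons, hp, hf, hs, ih]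

theorem pv_core_eq (gc : List Char) :
    generate_clean_code_core gc = generate_clean_code_alt_core gc := by
  unfold generate_clean_code_core generate_clean_code_alt_core
  simp only [pvSplitOn_eq, pvClean_eq_filterMap, List.nil_append, pvFused_eq_step2]
  set lines := pvSplit '\n' [] (PySem.Chars.strip gc) with hlines
  cases hclean : lines.filterMap pvPick with
  | nil => simp [PySem.Chars.join_nil]
  | cons p ps =>
    have hempty : ((p :: ps).isEmpty) = false := by simp
    rw [hempty]
    simp only [Bool.false_eq_true, if_false]
    have hnomem : ∀ q ∈ p :: ps, '\n' ∉ q := by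
      intro q hq hmem
      rw [← hclean] at hq
      obtain ⟨line, hline, hpick⟩ := List.mem_filterMap.mp hq
      have hq' : q = PySem.Chars.strip line := by
        simp only [pvPick] at hpick
        split_ifs at hpick
        simpa using hpick.symm
      have : '\n' ∈ line := pvMem_strip (hq' ▸ hmem)
      exact pvSplit_not_mem '\n' (PySem.Chars.strip gc) [] line (by simp) hline this
    rw [pvSplit_join '\n' ps p [] hnomem]
    simp

-- ===== VERDICT (by name: the statement is the Claim_ definition above) =====
theorem generate_clean_code_spec : Claim_equal_generate_clean_code := by
  intro gc _
  unfold Spec_generate_clean_code generate_clean_code generate_clean_code_alt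
  rw [pv_core_eq]
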